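-- pv_equiv track=rewrite | github.com/PyFPGA/pyfpga | fpga/tool/openflow.py | get_family
-- ===== SOURCE A (Python) =====
-- def get_family(part):
--     """Get the Family name from the specified part name."""
--     part = part.lower()
--     families = [
--         # From <YOSYS>/techlibs/xilinx/synth_xilinx.cc
--         'xcup', 'xcu', 'xc7', 'xc6s', 'xc6v', 'xc5v', 'xc4v', 'xc3sda',
--         'xc3sa', 'xc3se', 'xc3s', 'xc2vp', 'xc2v', 'xcve', 'xcv'
--     ]
--     for family in families:
--         if part.startswith(family):
--             return family
--     families = [
--         # From <nextpnr>/ice40/main.cc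
--         'lp384', 'lp1k', 'lp4k', 'lp8k', 'hx1k', 'hx4k', 'hx8k',
--         'up3k', 'up5k', 'u1k', 'u2k', 'u4k'
--     ]
--     if part.startswith(tuple(families)):
--         return 'ice40'
--     families = [
--         # From <nextpnr>/ecp5/main.cc
--         '12k', '25k', '45k', '85k', 'um-25k', 'um-45k', 'um-85k',
--         'um5g-25k', 'um5g-45k', 'um5g-85k'
--     ]
--     if part.startswith(tuple(families)):
--         return 'ecp5'
--     return 'UNKNOWN'
-- ===== SOURCE B (Python) =====
-- _PREFIX_TO_FAMILY = {}
-- for _p in ('xcup', 'xcu', 'xc7', 'xc6s', 'xc6v', 'xc5v', 'xc4v', 'xc3sda',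
--            'xc3sa', 'xc3se', 'xc3s', 'xc2vp', 'xc2v', 'xcve', 'xcv'):
--     _PREFIX_TO_FAMILY[_p] = _p
-- for _p in ('lp384', 'lp1k', 'lp4k', 'lp8k', 'hx1k', 'hx4k', 'hx8k',
--            'up3k', 'up5k', 'u1k', 'u2k', 'u4k'):
--     _PREFIX_TO_FAMILY[_p] = 'ice40'
-- for _p in ('12k', '25k', '45k', '85k', 'um-25k', 'um-45k', 'um-85k',
--            'um5g-25k', 'um5g-45k', 'um5g-85k'):
--     _PREFIX_TO_FAMILY[_p] = 'ecp5'
--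
--
-- def get_family(part):
--     """Get the Family name from the specified part name."""
--     part = part.lower()
--     # Longest-match hash lookup: probe the part's own leading substrings,
--     # longest first, against one prefix->family dict (prefix lengths are 3..8).
--     for size in range(8, 2, -1):
--         family = _PREFIX_TO_FAMILY.get(part[:size])
--         if family is not None:
--             return family
--     return 'UNKNOWN'
-- ===== Notes on version B (the rewrite author's own statement) =====
-- stated objective: alternative
-- what changed: Instead of scanning 37 prefixes with startswith, B builds one prefix->family dict and performs longest-match hash lookups of the part's own leading substrings part[:8] down to part[:3]; correct because whenever two table prefixes both match, the shorter is a prefix of the longer and the original order returns the longer one, so first-match equals longest-match.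
import Mathlib
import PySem

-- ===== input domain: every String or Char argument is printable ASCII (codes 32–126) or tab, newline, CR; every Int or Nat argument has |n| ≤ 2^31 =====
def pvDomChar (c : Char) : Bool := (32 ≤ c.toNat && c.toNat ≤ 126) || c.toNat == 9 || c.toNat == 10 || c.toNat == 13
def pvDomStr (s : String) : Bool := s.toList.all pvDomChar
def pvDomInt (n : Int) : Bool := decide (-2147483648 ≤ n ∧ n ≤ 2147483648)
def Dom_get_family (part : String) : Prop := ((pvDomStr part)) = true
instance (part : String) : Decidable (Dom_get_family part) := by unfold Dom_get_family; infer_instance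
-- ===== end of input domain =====

set_option maxRecDepth 16384

-- B replaces A's 37-prefix startswith scan by longest-match hash lookups of the
-- part's own leading substrings (part[:8] … part[:3]) in one prefix→family dict.

-- ===== PORT A =====
-- the 'for family in families: if part.startswith(family): return family' loop
def pvLoopA (p : String) : List String → Option String
  | [] => none
  | f :: rest => if PySem.Str.startswith p f then some f else pvLoopA p rest

def get_family (part : String) : String :=
  let p := PySem.Str.lower part
  match pvLoopA p ["xcup", "xcu", "xc7", "xc6s", "xc6v", "xc5v", "xc4v", "xc3sda",
                   "xc3sa", "xc3se", "xc3s", "xc2vp", "xc2v", "xcve", "xcv"] with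
  | some f => f
  | none =>
    -- part.startswith(tuple(families)) : any prefix in the tuple matches
    if (["lp384", "lp1k", "lp4k", "lp8k", "hx1k", "hx4k", "hx8k",
         "up3k", "up5k", "u1k", "u2k", "u4k"].any (fun f => PySem.Str.startswith p f)) then
      "ice40"
    else if (["12k", "25k", "45k", "85k", "um-25k", "um-45k", "um-85k",
              "um5g-25k", "um5g-45k", "um5g-85k"].any (fun f => PySem.Str.startswith p f)) then
      "ecp5"
    else
      "UNKNOWN"

-- ===== PORT B =====
def pvXilPrefixes : List String :=
  ["xcup", "xcu", "xc7", "xc6s", "xc6v", "xc5v", "xc4v", "xc3sda",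
   "xc3sa", "xc3se", "xc3s", "xc2vp", "xc2v", "xcve", "xcv"]
def pvIcePrefixes : List String :=
  ["lp384", "lp1k", "lp4k", "lp8k", "hx1k", "hx4k", "hx8k",
   "up3k", "up5k", "u1k", "u2k", "u4k"]
def pvEcpPrefixes : List String :=
  ["12k", "25k", "45k", "85k", "um-25k", "um-45k", "um-85k",
   "um5g-25k", "um5g-45k", "um5g-85k"]

-- the module-level '_PREFIX_TO_FAMILY' dict built by the three for-loops
def pvPrefixToFamily : PySem.Dict String String :=
  let d := pvXilPrefixes.foldl (fun d p => d.insert p p) PySem.Dict.empty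
  let d := pvIcePrefixes.foldl (fun d p => d.insert p "ice40") d
  pvEcpPrefixes.foldl (fun d p => d.insert p "ecp5") d

-- 'for size in range(8, 2, -1): … return family' with early return
def pvBScan (p : String) : List Int → String
  | [] => "UNKNOWN"
  | size :: rest =>
    match PySem.Dict.get? pvPrefixToFamily (PySem.Str.slice p none (some size)) with
    | some family => family
    | none => pvBScan p rest

def get_family_alt (part : String) : String :=
  pvBScan (PySem.Str.lower part) (PySem.List.pyRange 8 2 (-1))

-- ===== PRECONDITION & SPEC =====
def Spec_get_family (part : String) (out : String) : Prop := out = get_family_alt part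
instance (part : String) (out : String) : Decidable (Spec_get_family part out) := by unfold Spec_get_family; infer_instance

-- ===== CLAIM (what is proved, stated in full; the proofs are below) =====
def Claim_equal_get_family : Prop := ∀ (part : String), Dom_get_family part → Spec_get_family part (get_family part)

-- ===== LEMMAS AND PROOFS =====

-- proof-side flat (prefix, family) table: the items of pvPrefixToFamily in A's scan order
def pvTable : List (String × String) :=
  [("xcup", "xcup"), ("xcu", "xcu"), ("xc7", "xc7"), ("xc6s", "xc6s"), ("xc6v", "xc6v"),
   ("xc5v", "xc5v"), ("xc4v", "xc4v"), ("xc3sda", "xc3sda"), ("xc3sa", "xc3sa"),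
   ("xc3se", "xc3se"), ("xc3s", "xc3s"), ("xc2vp", "xc2vp"), ("xc2v", "xc2v"),
   ("xcve", "xcve"), ("xcv", "xcv"),
   ("lp384", "ice40"), ("lp1k", "ice40"), ("lp4k", "ice40"), ("lp8k", "ice40"),
   ("hx1k", "ice40"), ("hx4k", "ice40"), ("hx8k", "ice40"),
   ("up3k", "ice40"), ("up5k", "ice40"), ("u1k", "ice40"), ("u2k", "ice40"), ("u4k", "ice40"),
   ("12k", "ecp5"), ("25k", "ecp5"), ("45k", "ecp5"), ("85k", "ecp5"),
   ("um-25k", "ecp5"), ("um-45k", "ecp5"), ("um-85k", "ecp5"),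
   ("um5g-25k", "ecp5"), ("um5g-45k", "ecp5"), ("um5g-85k", "ecp5")]

theorem pv_dict_eq : pvPrefixToFamily = PySem.Dict.mk pvTable := by decide

-- A's result as a scan of the flat table (A-side reduction)
def pvScanTable (p : String) : List (String × String) → String
  | [] => "UNKNOWN"
  | (pre, fam) :: rest => if PySem.Str.startswith p pre then fam else pvScanTable p rest

theorem pv_table_decomp :
    pvTable
      = pvXilPrefixes.map (fun f => (f, f))
        ++ (pvIcePrefixes.map (fun f => (f, "ice40")) ++ (pvEcpPrefixes.map (fun f => (f, "ecp5")) ++ [])) := by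
  simp [pvTable, pvXilPrefixes, pvIcePrefixes, pvEcpPrefixes]

theorem pv_scan_diag (p : String) (xs : List String) (rest : List (String × String)) :
    pvScanTable p (xs.map (fun f => (f, f)) ++ rest)
      = match pvLoopA p xs with
        | some f => f
        | none => pvScanTable p rest := by
  induction xs with
  | nil => simp [pvLoopA]
  | cons f t ih =>
    simp only [List.map_cons, List.cons_append, pvScanTable, pvLoopA]
    split_ifs <;> simp [ih]

theorem pv_scan_const (p : String) (xs : List String) (fam : String)
    (rest : List (String × String)) :
    pvScanTable p (xs.map (fun f => (f, fam)) ++ rest)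
      = if xs.any (fun f => PySem.Str.startswith p f) then fam
        else pvScanTable p rest := by
  induction xs with
  | nil => simp
  | cons f t ih =>
    simp only [List.map_cons, List.cons_append, pvScanTable, List.any_cons, ih]
    rcases Bool.dichotomy (PySem.Str.startswith p f) with h | h <;> simp only [h] <;> simp

-- startswith on the character level
theorem pv_sw_iff (q s : String) : PySem.Str.startswith q s = true ↔ s.toList <+: q.toList := by
  simp [PySem.Str.startswith, PySem.Chars.startswith, List.isPrefixOf_iff_prefix]

-- q[:k] on the character level
theorem pv_slice_toList (q : String) (k : Int) (hk : 0 ≤ k) :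
    (PySem.Str.slice q none (some k)).toList = q.toList.take k.toNat := by
  simp [PySem.Str.slice, PySem.Chars.slice, String.toList_ofList, PySem.List.slice_to _ hk]

-- A's scan is the first match of the table
theorem pv_scan_eq_find (q : String) (table : List (String × String)) :
    pvScanTable q table
      = ((table.find? (fun kv => PySem.Str.startswith q kv.1)).map (·.2)).getD "UNKNOWN" := by
  induction table with
  | nil => simp [pvScanTable]
  | cons kv rest ih =>
    obtain ⟨pre, fam⟩ := kv
    simp only [pvScanTable, List.find?, PySem.Str.startswith]
    rcases Bool.dichotomy (PySem.Chars.startswith q.toList pre.toList) with h | h <;>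
      simp [h, ih, PySem.Str.startswith]

-- data fact: prefix lengths are all in {3,4,5,6,8}
theorem pv_lens : ∀ kv ∈ pvTable, (kv.1.toList.length : Int) ∈ ([8, 7, 6, 5, 4, 3] : List Int) := by
  decide

-- data fact: keys are pairwise distinct
theorem pv_keys_nodup : (pvTable.map (·.1)).Nodup := by decide

-- data fact: for i < j, key_j is strictly shorter than key_i or the two are prefix-incomparable
-- (every key that extends another key precedes it in the table)
theorem pv_pairwise :
    pvTable.Pairwise (fun a b =>
      b.1.toList.length < a.1.toList.length ∨
      (a.1.toList.isPrefixOf b.1.toList = false ∧ b.1.toList.isPrefixOf a.1.toList = false)) := by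
  decide

-- B's loop when nothing in the table is a prefix of q
theorem pv_bscan_none (q : String)
    (hnone : ∀ kv ∈ pvTable, ¬ PySem.Str.startswith q kv.1 = true) :
    ∀ ks : List Int, (∀ k ∈ ks, 0 ≤ k) → pvBScan q ks = "UNKNOWN" := by
  intro ks
  induction ks with
  | nil => intro _; rfl
  | cons k rest ih =>
    intro hpos
    have hmiss : pvTable.find? (fun kv => kv.1 == PySem.Str.slice q none (some k)) = none := by
      rw [List.find?_eq_none]
      intro kv hkv hb
      apply hnone kv hkv
      have : kv.1 = PySem.Str.slice q none (some k) := by simpa using hb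
      rw [pv_sw_iff, this, pv_slice_toList q k (hpos k (by simp))]
      exact List.take_prefix _ _
    simp only [pvBScan, pv_dict_eq, PySem.Dict.get?, hmiss, Option.map_none]
    exact ih (fun x hx => hpos x (by simp [hx]))

-- B's loop when m is the longest match (hit happens at size = |m.1| and returns m.2)
theorem pv_bscan_hit (q : String) (m : String × String)
    (hm : m ∈ pvTable)
    (hpref : m.1.toList <+: q.toList)
    (hmax : ∀ kv ∈ pvTable, PySem.Str.startswith q kv.1 = true →
            kv.1.toList.length ≤ m.1.toList.length) :
    ∀ ks : List Int, (∀ k ∈ ks, 0 ≤ k) → ((m.1.toList.length : Int) ∈ ks) →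
      ks.Pairwise (· > ·) → pvBScan q ks = m.2 := by
  intro ks
  induction ks with
  | nil => intro _ hmem _; simp at hmem
  | cons k rest ih =>
    intro hpos hmem hpw
    have hk0 : (0 : Int) ≤ k := hpos k (by simp)
    have hnk : (m.1.toList.length : Int) ≤ k := by
      rcases List.mem_cons.mp hmem with h | h
      · omega
      · exact le_of_lt ((List.pairwise_cons.mp hpw).1 _ h)
    have hnl : m.1.toList.length ≤ q.toList.length := hpref.length_le
    have hslice : (PySem.Str.slice q none (some k)).toList = q.toList.take k.toNat :=
      pv_slice_toList q k hk0
    cases hfind : pvTable.find? (fun kv => kv.1 == PySem.Str.slice q none (some k)) with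
    | some kv =>
      have hkv_mem : kv ∈ pvTable := List.mem_of_find?_eq_some hfind
      have hkv_eq : kv.1 = PySem.Str.slice q none (some k) := by
        simpa using List.find?_some hfind
      have hkvl : kv.1.toList = q.toList.take k.toNat := by rw [hkv_eq, hslice]
      have hkpref : kv.1.toList <+: q.toList := by rw [hkvl]; exact List.take_prefix _ _
      have hlen_le : kv.1.toList.length ≤ m.1.toList.length :=
        hmax kv hkv_mem ((pv_sw_iff q kv.1).mpr hkpref)
      have hlen_ge : m.1.toList.length ≤ kv.1.toList.length := by
        rw [hkvl, List.length_take]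
        omega
      have hkeys : kv.1 = m.1 := by
        have h1 := List.prefix_iff_eq_take.mp hkpref
        have h2 := List.prefix_iff_eq_take.mp hpref
        have : kv.1.toList = m.1.toList := by
          rw [h1, h2]; congr 1; omega
        calc kv.1 = String.ofList kv.1.toList := by rw [String.ofList_toList]
          _ = String.ofList m.1.toList := by rw [this]
          _ = m.1 := String.ofList_toList
      have : kv = m := List.inj_on_of_nodup_map pv_keys_nodup hkv_mem hm hkeys
      simp only [pvBScan, pv_dict_eq, PySem.Dict.get?, hfind, Option.map_some]
      rw [this]
    | none =>
      have hne : (m.1.toList.length : Int) ≠ k := by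
        intro hEq
        have hsm : m.1 = PySem.Str.slice q none (some k) := by
          have hk' : k.toNat = m.1.toList.length := by omega
          have : (PySem.Str.slice q none (some k)).toList = m.1.toList := by
            rw [hslice, hk']
            exact (List.prefix_iff_eq_take.mp hpref).symm
          calc m.1 = String.ofList m.1.toList := by rw [String.ofList_toList]
            _ = String.ofList (PySem.Str.slice q none (some k)).toList := by rw [this]
            _ = PySem.Str.slice q none (some k) := String.ofList_toList
        have := List.find?_eq_none.mp hfind m hm
        simp [hsm] at this
      have hmem' : (m.1.toList.length : Int) ∈ rest := by
        rcases List.mem_cons.mp hmem with h | h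
        · exact absurd h hne
        · exact h
      simp only [pvBScan, pv_dict_eq, PySem.Dict.get?, hfind, Option.map_none]
      exact ih (fun x hx => hpos x (by simp [hx])) hmem' (List.Pairwise.of_cons hpw)

-- core: A's first-match scan equals B's longest-match probe loop
theorem pv_scan_eq_bscan (q : String) :
    pvScanTable q pvTable = pvBScan q [8, 7, 6, 5, 4, 3] := by
  cases hf : pvTable.find? (fun kv => PySem.Str.startswith q kv.1) with
  | none =>
    rw [pv_scan_eq_find, hf]
    rw [pv_bscan_none q (fun kv hkv => by simpa using List.find?_eq_none.mp hf kv hkv)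
        [8, 7, 6, 5, 4, 3] (by decide)]
    rfl
  | some m =>
    obtain ⟨hpm, as, bs, htab, hfalse⟩ := List.find?_eq_some_iff_append.mp hf
    have hm : m ∈ pvTable := List.mem_of_find?_eq_some hf
    have hpref : m.1.toList <+: q.toList := (pv_sw_iff q m.1).mp hpm
    have hmax : ∀ kv ∈ pvTable, PySem.Str.startswith q kv.1 = true →
        kv.1.toList.length ≤ m.1.toList.length := by
      intro kv hkv hsw
      rw [htab] at hkv
      rcases List.mem_append.mp hkv with h | h
      · exact absurd hsw (by simpa using hfalse kv h)
      · rcases List.mem_cons.mp h with h | h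
        · rw [h]
        · have hpw := pv_pairwise
          rw [htab] at hpw
          have hR := (List.pairwise_cons.mp (List.pairwise_append.mp hpw).2.1).1 kv h
          rcases hR with hlt | ⟨h1, h2⟩
          · exact le_of_lt hlt
          · have hkpref : kv.1.toList <+: q.toList := (pv_sw_iff q kv.1).mp hsw
            rcases List.prefix_or_prefix_of_prefix hpref hkpref with hp | hp
            · rw [← List.isPrefixOf_iff_prefix (l₁ := m.1.toList)] at hp
              rw [h1] at hp; exact absurd hp (by simp)
            · rw [← List.isPrefixOf_iff_prefix (l₁ := kv.1.toList)] at hp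
              rw [h2] at hp; exact absurd hp (by simp)
    rw [pv_scan_eq_find, hf,
        pv_bscan_hit q m hm hpref hmax [8, 7, 6, 5, 4, 3] (by decide)
          (by simpa using pv_lens m hm) (by decide)]
    rfl

-- ===== VERDICT (by name: the statement is the Claim_ definition above) =====
theorem get_family_spec : Claim_equal_get_family := by
  intro part _
  unfold Spec_get_family get_family get_family_alt
  have hrange : PySem.List.pyRange 8 2 (-1) = ([8, 7, 6, 5, 4, 3] : List Int) := by decide
  rw [hrange, ← pv_scan_eq_bscan]
  rw [pv_table_decomp, pv_scan_diag, pv_scan_const, pv_scan_const]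
  simp only [pvXilPrefixes, pvIcePrefixes, pvEcpPrefixes, pvScanTable]
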